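-- pv_equiv track=rewrite | github.com/miliar/Code_Jam_Webscraper | solutions_python/Problem_209/542.py | max_k_sum
-- ===== SOURCE A (Python) =====
-- def max_k_sum(nums, K):
--     assert K >= 1
--     N = len(nums)
--     sums = [0] * (N + 1)
--     for k in range(K - 1):
--         sums_ = [0] * (N + 1)
--         for i in range(N - 1 - k, -1, -1):
--             sums_[i] = max(sums_[i + 1], sums[i + 1] + nums[i])
--         sums = sums_
--     return [sums[i + 1] + n for (i, n) in enumerate(nums)]
-- ===== SOURCE B (Python) =====
-- def max_k_sum(nums, K):
--     assert K >= 1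
--     # Transposed DP: one right-to-left pass over positions, rolling O(K) level vector
--     # dp[j] = best constrained sum of at most j picks from the suffix starting at i+1.
--     N = len(nums)
--     dp = [0] * K
--     out = [0] * N
--     for i in range(N - 1, -1, -1):
--         out[i] = nums[i] + dp[K - 1]
--         for j in range(min(K - 1, N - i), 0, -1):
--             v = dp[j - 1] + nums[i]
--             if v > dp[j]:
--                 dp[j] = v
--     return out
-- ===== Notes on version B (the rewrite author's own statement) =====
-- stated objective: alternative
-- what changed: A runs K-1 separate right-to-left passes, each allocating a fresh (N+1)-entry array per DP level; B does a single right-to-left pass over the positions, maintaining a rolling K-entry level vector updated in place (loop interchange), writing each output entry as soon as its position is reached.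
import Mathlib
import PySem

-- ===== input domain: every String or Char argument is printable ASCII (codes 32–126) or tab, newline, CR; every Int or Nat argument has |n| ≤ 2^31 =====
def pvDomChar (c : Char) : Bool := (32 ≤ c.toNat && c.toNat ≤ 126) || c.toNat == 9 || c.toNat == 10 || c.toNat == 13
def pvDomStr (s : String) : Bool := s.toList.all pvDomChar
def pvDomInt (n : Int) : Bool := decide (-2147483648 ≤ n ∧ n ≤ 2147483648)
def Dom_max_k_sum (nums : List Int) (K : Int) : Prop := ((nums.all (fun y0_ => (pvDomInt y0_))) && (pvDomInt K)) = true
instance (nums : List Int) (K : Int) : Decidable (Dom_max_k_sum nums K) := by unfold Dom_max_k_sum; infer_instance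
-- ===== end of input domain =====

-- B replaces A's K-1 whole-array DP passes by a single right-to-left pass with a rolling
-- K-entry level vector (loop interchange); equivalence of the RETURN values is proved below.

-- ===== PORT A =====
-- Literal transliteration of A.  All pyGetD indices are in range on the admitted
-- inputs (K ≥ 1), where pyGetD is exact.
def max_k_sum (nums : List Int) (K : Int) : List Int :=
  let N : Int := nums.length
  let sums0 : List Int := List.replicate (N + 1).toNat 0
  let sums := (PySem.List.pyRange 0 (K - 1) 1).foldl (fun sums k =>
      (PySem.List.pyRange (N - 1 - k) (-1) (-1)).foldl (fun sums_ i =>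
          PySem.List.pySetD sums_ i
            (max (PySem.List.pyGetD sums_ (i + 1) 0)
                 (PySem.List.pyGetD sums (i + 1) 0 + PySem.List.pyGetD nums i 0)))
        (List.replicate (N + 1).toNat 0))
    sums0
  (PySem.List.enumerate nums 0).map (fun p => PySem.List.pyGetD sums (p.1 + 1) 0 + p.2)

-- ===== PORT B =====
-- Transliteration of Source B: one pass i = N-1 … 0 over (out, dp); dp has K entries.
def max_k_sum_alt (nums : List Int) (K : Int) : List Int :=
  let N : Int := nums.length
  let res := (PySem.List.pyRange (N - 1) (-1) (-1)).foldl
    (fun (st : List Int × List Int) i =>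
      let out := PySem.List.pySetD st.1 i
        (PySem.List.pyGetD nums i 0 + PySem.List.pyGetD st.2 (K - 1) 0)
      let dp := (PySem.List.pyRange (min (K - 1) (N - i)) 0 (-1)).foldl
        (fun dp j =>
          let v := PySem.List.pyGetD dp (j - 1) 0 + PySem.List.pyGetD nums i 0
          if PySem.List.pyGetD dp j 0 < v then PySem.List.pySetD dp j v else dp)
        st.2
      (out, dp))
    (List.replicate N.toNat 0, List.replicate K.toNat 0)
  res.1

-- ===== PRECONDITION & SPEC =====
-- Pre_ excludes exactly K < 1, where A's 'assert K >= 1' raises AssertionError.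
def Pre_max_k_sum (nums : List Int) (K : Int) : Prop := 1 ≤ K
instance (nums : List Int) (K : Int) : Decidable (Pre_max_k_sum nums K) := by
  unfold Pre_max_k_sum; infer_instance

def pvWitness_max_k_sum : List Int × Int := ([3, -1, 4, 1, -5], 3)

def Spec_max_k_sum (nums : List Int) (K : Int) (out : List Int) : Prop := out = max_k_sum_alt nums K
instance (nums : List Int) (K : Int) (out : List Int) : Decidable (Spec_max_k_sum nums K out) := by
  unfold Spec_max_k_sum; infer_instance

-- ===== CLAIM (what is proved, stated in full; the proofs are below) =====
def Claim_equal_max_k_sum : Prop := ∀ (nums : List Int) (K : Int), Dom_max_k_sum nums K → Pre_max_k_sum nums K → Spec_max_k_sum nums K (max_k_sum nums K)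

-- ===== LEMMAS AND PROOFS =====

-- The common DP value: refS nums j i = A's level-j array entry sums[i].
def refS (nums : List Int) : Nat → Nat → Int
  | 0, _ => 0
  | j+1, i =>
    if _h : i + j + 1 ≤ nums.length then
      max (refS nums (j+1) (i+1)) (refS nums j (i+1) + nums.getD i 0)
    else 0
termination_by j i => (j, nums.length - i)
decreasing_by
  · exact Prod.Lex.right _ (by omega)
  · exact Prod.Lex.left _ _ (by omega)

theorem refS_zero (nums : List Int) (i : Nat) : refS nums 0 i = 0 := by
  simp [refS]

theorem refS_of_gt (nums : List Int) {j i : Nat} (h : nums.length < i + j) :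
    refS nums j i = 0 := by
  cases j with
  | zero => simp [refS]
  | succ j => rw [refS, dif_neg (by omega)]

theorem refS_succ (nums : List Int) {j i : Nat} (h : i + j + 1 ≤ nums.length) :
    refS nums (j+1) i = max (refS nums (j+1) (i+1)) (refS nums j (i+1) + nums.getD i 0) := by
  rw [refS, dif_pos h]

theorem mapRange_congr {n : Nat} {f g : Nat → Int} (h : ∀ s, s < n → f s = g s) :
    (List.range n).map f = (List.range n).map g :=
  List.map_congr_left (fun s hs => h s (List.mem_range.mp hs))

theorem mapRange_const {n : Nat} {f : Nat → Int} (h : ∀ s, s < n → f s = 0) :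
    (List.range n).map f = List.replicate n 0 := by
  rw [mapRange_congr h, List.map_const', List.length_range]

theorem mapRange_set {n : Nat} (f : Nat → Int) {t : Nat} (ht : t < n) (v : Int) :
    ((List.range n).map f).set t v = (List.range n).map (fun s => if s = t then v else f s) := by
  apply List.ext_getElem (by simp)
  intro k h1 h2
  simp only [List.getElem_set, List.getElem_map, List.getElem_range]
  rcases eq_or_ne t k with rfl | hk
  · simp
  · simp [hk, Ne.symm hk]

-- invariant lists for A's inner loop: entries above m are already at level j, the rest still 0
def lvlA (nums : List Int) (j : Nat) (m : Int) : List Int :=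
  (List.range (nums.length + 1)).map
    (fun (t : Nat) => if m < (t : Int) then refS nums j t else 0)

def lvlF (nums : List Int) (j : Nat) : List Int :=
  (List.range (nums.length + 1)).map (fun (t : Nat) => refS nums j t)

theorem getD_lvlA (nums : List Int) (j : Nat) (m : Int) {t : Nat} (ht : t < nums.length + 1) :
    (lvlA nums j m).getD t 0 = if m < (t : Int) then refS nums j t else 0 := by
  unfold lvlA
  exact PySem.List.getD_map_range _ _ _ _ ht

theorem getD_lvlF (nums : List Int) (j : Nat) {t : Nat} (ht : t < nums.length + 1) :
    (lvlF nums j).getD t 0 = refS nums j t := by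
  unfold lvlF
  exact PySem.List.getD_map_range _ _ _ _ ht

theorem lvlA_neg_one (nums : List Int) (j : Nat) : lvlA nums j (-1) = lvlF nums j := by
  unfold lvlA lvlF
  exact mapRange_congr fun s _ => if_pos (by omega)

theorem stepA (nums : List Int) (j n : Nat) (hn : (n : Int) ≤ (nums.length : Int) - 1 - j) :
    PySem.List.pySetD (lvlA nums (j+1) n) n
      (max (PySem.List.pyGetD (lvlA nums (j+1) n) ((n : Int) + 1) 0)
           (PySem.List.pyGetD (lvlF nums j) ((n : Int) + 1) 0 + PySem.List.pyGetD nums n 0)) =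
    lvlA nums (j+1) ((n : Int) - 1) := by
  have hsz : n + 1 < nums.length + 1 := by omega
  rw [show ((n : Int) + 1) = ((n + 1 : Nat) : Int) by push_cast; ring]
  rw [PySem.List.pyGetD_natCast, PySem.List.pyGetD_natCast, PySem.List.pyGetD_natCast,
      getD_lvlA nums (j+1) n hsz, getD_lvlF nums j hsz, if_pos (by omega),
      PySem.List.pySetD_of_nonneg _ _ (by omega), Int.toNat_natCast]
  unfold lvlA
  rw [mapRange_set _ (show n < nums.length + 1 by omega)]
  refine mapRange_congr fun s hs => ?_
  rcases eq_or_ne s n with rfl | hne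
  · rw [if_pos rfl, if_pos (by omega)]
    exact (refS_succ nums (by omega)).symm
  · rw [if_neg hne]
    by_cases hlt : (n : Int) < (s : Int)
    · rw [if_pos hlt, if_pos (by omega)]
    · rw [if_neg hlt, if_neg (by omega)]

theorem loopA (nums : List Int) (j : Nat) :
    ∀ n : Nat, (n : Int) ≤ (nums.length : Int) - 1 - j →
    (PySem.List.pyRange (n : Int) (-1) (-1)).foldl
      (fun sums_ i => PySem.List.pySetD sums_ i
        (max (PySem.List.pyGetD sums_ (i + 1) 0)
             (PySem.List.pyGetD (lvlF nums j) (i + 1) 0 + PySem.List.pyGetD nums i 0)))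
      (lvlA nums (j+1) n)
    = lvlA nums (j+1) (-1) := by
  intro n
  induction n with
  | zero =>
    intro hn
    rw [PySem.List.pyRange_neg_one_cons (by omega), List.foldl_cons,
        PySem.List.pyRange_neg_one_eq_nil (by omega), List.foldl_nil]
    have := stepA nums j 0 hn
    simpa using this
  | succ m ih =>
    intro hn
    rw [PySem.List.pyRange_neg_one_cons (by omega), List.foldl_cons, stepA nums j (m+1) hn,
        show ((m + 1 : Nat) : Int) - 1 = (m : Int) by push_cast; ring]
    exact ih (by omega)

theorem lvlF_zero (nums : List Int) :
    lvlF nums 0 = List.replicate (((nums.length : Int) + 1).toNat) 0 := by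
  rw [show ((nums.length : Int) + 1).toNat = nums.length + 1 by omega]
  unfold lvlF
  exact mapRange_const fun s _ => refS_zero nums s

theorem innerFull (nums : List Int) (j : Nat) :
    (PySem.List.pyRange ((nums.length : Int) - 1 - j) (-1) (-1)).foldl
      (fun sums_ i => PySem.List.pySetD sums_ i
        (max (PySem.List.pyGetD sums_ (i + 1) 0)
             (PySem.List.pyGetD (lvlF nums j) (i + 1) 0 + PySem.List.pyGetD nums i 0)))
      (List.replicate (((nums.length : Int) + 1).toNat) 0)
    = lvlF nums (j+1) := by
  have hlen : ((nums.length : Int) + 1).toNat = nums.length + 1 := by omega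
  by_cases h : 0 ≤ (nums.length : Int) - 1 - j
  · set n : Nat := ((nums.length : Int) - 1 - (j : Int)).toNat with hn
    have hcast : ((n : Int)) = (nums.length : Int) - 1 - j := by omega
    have hinit : List.replicate (((nums.length : Int) + 1).toNat) (0 : Int)
        = lvlA nums (j+1) n := by
      rw [hlen]
      unfold lvlA
      symm
      refine mapRange_const fun s _ => ?_
      by_cases hc : (n : Int) < (s : Int)
      · rw [if_pos hc, refS_of_gt nums (by omega)]
      · rw [if_neg hc]
    rw [hinit, ← hcast, loopA nums j n (by omega), lvlA_neg_one]
  · rw [PySem.List.pyRange_neg_one_eq_nil (by omega), List.foldl_nil, hlen]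
    unfold lvlF
    symm
    exact mapRange_const fun s _ => refS_of_gt nums (by omega)

theorem loopOuter (nums : List Int) (K : Int) :
    ∀ d c : Nat, (c : Int) + d = K - 1 →
    (PySem.List.pyRange (c : Int) (K - 1) 1).foldl
      (fun sums k =>
        (PySem.List.pyRange ((nums.length : Int) - 1 - k) (-1) (-1)).foldl
          (fun sums_ i => PySem.List.pySetD sums_ i
            (max (PySem.List.pyGetD sums_ (i + 1) 0)
                 (PySem.List.pyGetD sums (i + 1) 0 + PySem.List.pyGetD nums i 0)))
          (List.replicate (((nums.length : Int) + 1).toNat) 0))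
      (lvlF nums c)
    = lvlF nums (K - 1).toNat := by
  intro d
  induction d with
  | zero =>
    intro c hc
    rw [PySem.List.pyRange_one_eq_nil (by omega), List.foldl_nil,
        show (K - 1).toNat = c by omega]
  | succ e ih =>
    intro c hc
    rw [PySem.List.pyRange_one_cons (by omega), List.foldl_cons, innerFull nums c,
        show ((c : Int)) + 1 = ((c + 1 : Nat) : Int) by push_cast; ring]
    exact ih (c+1) (by omega)

theorem A_eq (nums : List Int) (K : Int) (hK : 1 ≤ K) :
    max_k_sum nums K = (List.range nums.length).map
      (fun t => refS nums (K.toNat - 1) (t + 1) + nums.getD t 0) := by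
  have h := loopOuter nums K (K - 1).toNat 0 (by omega)
  rw [lvlF_zero nums, show (K - 1).toNat = K.toNat - 1 by omega] at h
  simp only [max_k_sum]
  rw [show ((0 : Nat) : Int) = (0 : Int) from rfl] at h
  rw [h, PySem.List.enumerate_eq_map_pyRange nums 0, List.map_map]
  rw [PySem.List.len_eq, PySem.List.pyRange_zero_nat, List.map_map]
  refine mapRange_congr fun s hs => ?_
  simp only [Function.comp_apply]
  rw [show ((s : Int) + 1) = ((s + 1 : Nat) : Int) by push_cast; ring,
      PySem.List.pyGetD_natCast, PySem.List.pyGetD_natCast, getD_lvlF nums _ (by omega)]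

-- ===== B side: invariants for the single right-to-left pass =====

def outB (nums : List Int) (K : Int) (n : Nat) : List Int :=
  (List.range nums.length).map
    (fun (t : Nat) => if n ≤ t then nums.getD t 0 + refS nums (K.toNat - 1) (t + 1) else 0)

def dpB (nums : List Int) (K : Int) (i : Nat) : List Int :=
  (List.range K.toNat).map (fun (j : Nat) => refS nums j i)

def dMix (nums : List Int) (K : Int) (m : Nat) (j : Int) : List Int :=
  (List.range K.toNat).map
    (fun (t : Nat) => if j < (t : Int) ∧ (t : Int) ≤ (nums.length : Int) - m then refS nums t m
              else refS nums t (m+1))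

theorem getD_dMix (nums : List Int) (K : Int) (m : Nat) (jc : Int) {t : Nat}
    (ht : t < K.toNat) :
    (dMix nums K m jc).getD t 0
      = if jc < (t : Int) ∧ (t : Int) ≤ (nums.length : Int) - m then refS nums t m
        else refS nums t (m+1) := by
  unfold dMix
  exact PySem.List.getD_map_range _ _ _ _ ht

theorem stepB_dp (nums : List Int) (K : Int) (hK : 1 ≤ K) (m : Nat) (hm : m < nums.length)
    (j : Nat) (hj1 : 1 ≤ j) (hj : (j : Int) ≤ min (K - 1) ((nums.length : Int) - m)) :
    (if PySem.List.pyGetD (dMix nums K m j) (j : Int) 0 <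
          PySem.List.pyGetD (dMix nums K m j) ((j : Int) - 1) 0 + PySem.List.pyGetD nums (m : Int) 0
     then PySem.List.pySetD (dMix nums K m j) (j : Int)
          (PySem.List.pyGetD (dMix nums K m j) ((j : Int) - 1) 0 + PySem.List.pyGetD nums (m : Int) 0)
     else dMix nums K m j)
    = dMix nums K m ((j : Int) - 1) := by
  have hjK : j < K.toNat := by omega
  have hj1K : j - 1 < K.toNat := by omega
  have hsucc : refS nums j m
      = max (refS nums j (m+1)) (refS nums (j-1) (m+1) + nums.getD m 0) := by
    conv_lhs => rw [show j = (j - 1) + 1 by omega]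
    rw [refS_succ nums (by omega), show j - 1 + 1 = j by omega]
  rw [show ((j : Int) - 1) = ((j - 1 : Nat) : Int) by omega]
  simp only [PySem.List.pyGetD_natCast]
  rw [getD_dMix nums K m _ hjK, getD_dMix nums K m _ hj1K,
      if_neg (show ¬((j : Int) < (j : Int) ∧ (j : Int) ≤ (nums.length : Int) - m) by omega),
      if_neg (show ¬((j : Int) < ((j - 1 : Nat) : Int) ∧ ((j - 1 : Nat) : Int) ≤ (nums.length : Int) - m) by omega)]
  split_ifs with hlt
  · rw [PySem.List.pySetD_of_nonneg _ _ (by omega), Int.toNat_natCast]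
    unfold dMix
    rw [mapRange_set _ hjK]
    refine mapRange_congr fun s hs => ?_
    rcases eq_or_ne s j with rfl | hne
    · rw [if_pos rfl,
          if_pos (show ((s - 1 : Nat) : Int) < (s : Int) ∧ (s : Int) ≤ (nums.length : Int) - m by omega),
          hsucc]
      exact (max_eq_right (le_of_lt hlt)).symm
    · rw [if_neg hne]
      have hiff : ((j : Int) < (s : Int) ∧ (s : Int) ≤ (nums.length : Int) - m)
          ↔ (((j - 1 : Nat) : Int) < (s : Int) ∧ (s : Int) ≤ (nums.length : Int) - m) := by
        omega
      rw [if_congr hiff rfl rfl]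
  · unfold dMix
    refine mapRange_congr fun s hs => ?_
    rcases eq_or_ne s j with rfl | hne
    · rw [if_neg (show ¬((s : Int) < (s : Int) ∧ (s : Int) ≤ (nums.length : Int) - m) by omega),
          if_pos (show ((s - 1 : Nat) : Int) < (s : Int) ∧ (s : Int) ≤ (nums.length : Int) - m by omega),
          hsucc]
      exact (max_eq_left (not_lt.mp hlt)).symm
    · have hiff : ((j : Int) < (s : Int) ∧ (s : Int) ≤ (nums.length : Int) - m)
          ↔ (((j - 1 : Nat) : Int) < (s : Int) ∧ (s : Int) ≤ (nums.length : Int) - m) := by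
        omega
      rw [if_congr hiff rfl rfl]

theorem loopB_dp (nums : List Int) (K : Int) (hK : 1 ≤ K) (m : Nat) (hm : m < nums.length) :
    ∀ j : Nat, (j : Int) ≤ min (K - 1) ((nums.length : Int) - m) →
    (PySem.List.pyRange (j : Int) 0 (-1)).foldl
      (fun dp j =>
        if PySem.List.pyGetD dp j 0 <
            PySem.List.pyGetD dp (j - 1) 0 + PySem.List.pyGetD nums (m : Int) 0
        then PySem.List.pySetD dp j
            (PySem.List.pyGetD dp (j - 1) 0 + PySem.List.pyGetD nums (m : Int) 0)
        else dp)
      (dMix nums K m j)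
    = dMix nums K m 0 := by
  intro j
  induction j with
  | zero =>
    intro _
    rw [PySem.List.pyRange_neg_one_eq_nil (by omega), List.foldl_nil]
    norm_num
  | succ p ih =>
    intro hj
    rw [PySem.List.pyRange_neg_one_cons (by omega), List.foldl_cons]
    rw [stepB_dp nums K hK m hm (p+1) (by omega) hj,
        show ((p + 1 : Nat) : Int) - 1 = (p : Int) by push_cast; ring]
    exact ih (by omega)

theorem dMix_top (nums : List Int) (K : Int) (hK : 1 ≤ K) (m : Nat) (hm : m < nums.length) :
    dMix nums K m (min (K - 1) ((nums.length : Int) - m)) = dpB nums K (m+1) := by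
  unfold dMix dpB
  exact mapRange_congr fun s hs => if_neg (by omega)

theorem dMix_bot (nums : List Int) (K : Int) (m : Nat) :
    dMix nums K m 0 = dpB nums K m := by
  unfold dMix dpB
  refine mapRange_congr fun s _ => ?_
  by_cases hc : (0 : Int) < (s : Int) ∧ (s : Int) ≤ (nums.length : Int) - m
  · rw [if_pos hc]
  · rw [if_neg hc]
    rcases Nat.eq_zero_or_pos s with rfl | hs1
    · rw [refS_zero, refS_zero]
    · rw [refS_of_gt nums (by omega), refS_of_gt nums (by omega)]

theorem loopB (nums : List Int) (K : Int) (hK : 1 ≤ K) :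
    ∀ n : Nat, n ≤ nums.length →
    (PySem.List.pyRange ((n : Int) - 1) (-1) (-1)).foldl
      (fun (st : List Int × List Int) i =>
        (PySem.List.pySetD st.1 i
          (PySem.List.pyGetD nums i 0 + PySem.List.pyGetD st.2 (K - 1) 0),
         (PySem.List.pyRange (min (K - 1) ((nums.length : Int) - i)) 0 (-1)).foldl
          (fun dp j =>
            if PySem.List.pyGetD dp j 0 <
                PySem.List.pyGetD dp (j - 1) 0 + PySem.List.pyGetD nums i 0
            then PySem.List.pySetD dp j
                (PySem.List.pyGetD dp (j - 1) 0 + PySem.List.pyGetD nums i 0)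
            else dp)
          st.2))
      (outB nums K n, dpB nums K n)
    = (outB nums K 0, dpB nums K 0) := by
  intro n
  induction n with
  | zero =>
    intro _
    rw [PySem.List.pyRange_neg_one_eq_nil (by omega), List.foldl_nil]
  | succ m ih =>
    intro hn
    have hm : m < nums.length := by omega
    rw [show ((m + 1 : Nat) : Int) - 1 = (m : Int) by push_cast; ring,
        PySem.List.pyRange_neg_one_cons (by omega), List.foldl_cons]
    have hout : PySem.List.pySetD (outB nums K (m+1)) (m : Int)
        (PySem.List.pyGetD nums (m : Int) 0 + PySem.List.pyGetD (dpB nums K (m+1)) (K - 1) 0)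
        = outB nums K m := by
      rw [show (K - 1 : Int) = ((K.toNat - 1 : Nat) : Int) by omega]
      simp only [PySem.List.pyGetD_natCast]
      unfold dpB
      rw [PySem.List.getD_map_range _ _ _ _ (show K.toNat - 1 < K.toNat by omega),
          PySem.List.pySetD_of_nonneg _ _ (by omega), Int.toNat_natCast]
      unfold outB
      rw [mapRange_set _ hm]
      refine mapRange_congr fun s hs => ?_
      rcases eq_or_ne s m with rfl | hne
      · rw [if_pos rfl, if_pos (by omega)]
      · rw [if_neg hne]
        by_cases hc2 : m + 1 ≤ s
        · rw [if_pos hc2, if_pos (by omega)]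
        · rw [if_neg hc2, if_neg (by omega)]
    have hdp :
        (PySem.List.pyRange (min (K - 1) ((nums.length : Int) - (m : Nat))) 0 (-1)).foldl
          (fun dp j =>
            if PySem.List.pyGetD dp j 0 <
                PySem.List.pyGetD dp (j - 1) 0 + PySem.List.pyGetD nums (m : Int) 0
            then PySem.List.pySetD dp j
                (PySem.List.pyGetD dp (j - 1) 0 + PySem.List.pyGetD nums (m : Int) 0)
            else dp)
          (dpB nums K (m+1))
        = dpB nums K m := by
      have h0 : (0 : Int) ≤ min (K - 1) ((nums.length : Int) - m) := by omega
      rw [← dMix_top nums K hK m hm,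
          ← Int.toNat_of_nonneg h0, ← dMix_bot nums K m]
      exact loopB_dp nums K hK m hm _ (by omega)
    dsimp only
    rw [hout, hdp]
    exact ih (by omega)

theorem B_eq (nums : List Int) (K : Int) (hK : 1 ≤ K) :
    max_k_sum_alt nums K = (List.range nums.length).map
      (fun t => nums.getD t 0 + refS nums (K.toNat - 1) (t + 1)) := by
  have houtN : List.replicate (((nums.length : Int)).toNat) (0 : Int) = outB nums K nums.length := by
    rw [Int.toNat_natCast]
    unfold outB
    exact (mapRange_const fun s hs => if_neg (by omega)).symm
  have hdpN : List.replicate K.toNat (0 : Int) = dpB nums K nums.length := by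
    unfold dpB
    refine (mapRange_const fun s _ => ?_).symm
    rcases Nat.eq_zero_or_pos s with rfl | hs1
    · exact refS_zero nums _
    · exact refS_of_gt nums (by omega)
  have h := loopB nums K hK nums.length (le_refl _)
  simp only [max_k_sum_alt]
  rw [houtN, hdpN, h]
  unfold outB
  exact mapRange_congr fun s _ => if_pos (Nat.zero_le s)

-- ===== VERDICT (by name: the statement is the Claim_ definition above) =====
theorem max_k_sum_spec : Claim_equal_max_k_sum := by
  intro nums K _ hK
  have hK' : 1 ≤ K := hK
  show max_k_sum nums K = max_k_sum_alt nums K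
  rw [A_eq nums K hK', B_eq nums K hK']
  exact mapRange_congr fun s _ => add_comm _ _
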